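-- pv_equiv track=rewrite | github.com/keelyjoon/499programs | diskStacking.py | DiskStacking
-- ===== SOURCE A (Python) =====
-- def DiskStacking(disks):
--     disks.sort(key=lambda x: x[2])
--     heights = [disk[2] for disk in disks]
--     sequences = [-1 for _ in disks]
--     for i in range(1, len(disks)):
--         current_disk = disks[i]
--         for j in range(i):
--             other_disk = disks[j]
--             if are_valid_dimensions(other_disk, current_disk):
--                 if heights[i] <= current_disk[2] + heights[j]:
--                     heights[i] = current_disk[2] + heights[j]
--                     sequences[i] = j
--     max_index = heights.index(max(heights))
--     sequence = build_sequence(disks, sequences, max_index)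
--     return sequence
--
-- def are_valid_dimensions(other_disk, current_disk):
--     return other_disk[0] < current_disk[0] and other_disk[1] < current_disk[1] and other_disk[2] < current_disk[2]
--
-- def build_sequence(disks, sequences, index):
--     sequence = []
--     while index != -1:
--         sequence.append(disks[index])
--         index = sequences[index]
--     sequence.reverse()
--     return sequence
-- ===== SOURCE B (Python) =====
-- # Max-height disk stack: sort by height, then a memoized recursion computes for
-- # each disk the best stack ending there (height + predecessor); the top disk is
-- # picked with max(range, key) and the stack is rebuilt front-first with insert(0).
-- def DiskStacking(disks):
--     disks.sort(key=lambda x: x[2])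
--
--     memo = {}
--
--     def best(i):
--         if i not in memo:
--             h, p = disks[i][2], -1
--             for j in range(i):
--                 if (disks[j][0] < disks[i][0] and disks[j][1] < disks[i][1]
--                         and disks[j][2] < disks[i][2]):
--                     hj = disks[i][2] + best(j)[0]
--                     if h <= hj:
--                         h, p = hj, j
--             memo[i] = (h, p)
--         return memo[i]
--
--     top = max(range(len(disks)), key=lambda i: best(i)[0])
--
--     stack = []
--     while top != -1:
--         stack.insert(0, disks[top])
--         top = best(top)[1]
--     return stack
-- ===== Notes on version B (the rewrite author's own statement) =====
-- stated objective: alternative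
-- what changed: Replaces A's bottom-up height/predecessor table DP with in-place list mutation by a top-down memoized recursion best(i) per disk, selects the top disk with max(range(n), key=...) instead of heights.index(max(heights)), and rebuilds the stack front-first with insert(0) in a while loop instead of append-then-reverse; Pre_ excludes only the inputs where A raises (empty list, or a disk with fewer than 3 entries).
import Mathlib
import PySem

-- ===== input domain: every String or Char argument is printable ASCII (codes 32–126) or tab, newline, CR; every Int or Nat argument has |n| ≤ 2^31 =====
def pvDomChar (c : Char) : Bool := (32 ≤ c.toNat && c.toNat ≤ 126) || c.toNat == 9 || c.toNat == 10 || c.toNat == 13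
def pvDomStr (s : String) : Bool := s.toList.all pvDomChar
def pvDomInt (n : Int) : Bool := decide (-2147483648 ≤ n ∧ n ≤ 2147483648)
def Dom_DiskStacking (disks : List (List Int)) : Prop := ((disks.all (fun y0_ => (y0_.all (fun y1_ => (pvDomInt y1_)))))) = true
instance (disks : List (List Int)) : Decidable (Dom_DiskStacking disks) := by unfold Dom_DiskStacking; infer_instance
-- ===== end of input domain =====

-- B replaces A's bottom-up height/predecessor tables by a top-down memoized
-- recursion best i = (max stack height ending at disk i, its predecessor), a
-- first-argmax top pick via max-with-key, and a front-first rebuild of the stack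
-- (objective: alternative decomposition, same cost). Like A, the Python B sorts
-- its argument in place; the equivalence proved here is about the return value.

-- ===== PORT A =====
def areValidDimensions (otherDisk currentDisk : List Int) : Bool :=
  decide (PySem.List.pyGetD otherDisk 0 0 < PySem.List.pyGetD currentDisk 0 0) &&
  decide (PySem.List.pyGetD otherDisk 1 0 < PySem.List.pyGetD currentDisk 1 0) &&
  decide (PySem.List.pyGetD otherDisk 2 0 < PySem.List.pyGetD currentDisk 2 0)

def buildSequenceLoop (disks : List (List Int)) (sequences : List Int) : Nat → Int → List (List Int) → List (List Int)
  | 0, _, sequence => sequence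
  | fuel + 1, index, sequence =>
    if index = -1 then sequence
    else buildSequenceLoop disks sequences fuel (PySem.List.pyGetD sequences index (-1))
           (sequence ++ [PySem.List.pyGetD disks index []])

def buildSequence (disks : List (List Int)) (sequences : List Int) (index : Int) : List (List Int) :=
  (buildSequenceLoop disks sequences (disks.length + 1) index []).reverse

def DiskStacking (disks : List (List Int)) : List (List Int) :=
  let ds := PySem.List.sorted disks (fun x => PySem.List.pyGetD x 2 0)
  let heights0 := ds.map (fun disk => PySem.List.pyGetD disk 2 0)
  let sequences0 := ds.map (fun _ => (-1 : Int))
  let st := (List.range' 1 (ds.length - 1)).foldl (fun (st : List Int × List Int) (i : Nat) =>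
      let currentDisk := PySem.List.pyGetD ds (i : Int) []
      let c := (List.range i).foldl (fun (c : Int × Int) (j : Nat) =>
          let otherDisk := PySem.List.pyGetD ds (j : Int) []
          if areValidDimensions otherDisk currentDisk then
            (if c.1 ≤ PySem.List.pyGetD currentDisk 2 0 + PySem.List.pyGetD st.1 (j : Int) 0 then
              (PySem.List.pyGetD currentDisk 2 0 + PySem.List.pyGetD st.1 (j : Int) 0, (j : Int))
            else c)
          else c)
          (PySem.List.pyGetD st.1 (i : Int) 0, PySem.List.pyGetD st.2 (i : Int) (-1))
      (st.1.set i c.1, st.2.set i c.2))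
      (heights0, sequences0)
  let maxHeight := (PySem.List.max? st.1 (fun h => h)).getD 0
  let maxIndex := (PySem.List.index? st.1 maxHeight).getD 0
  buildSequence ds st.2 (maxIndex : Int)

-- ===== PORT B =====
def validAbove (o d : List Int) : Bool :=
  decide (PySem.List.pyGetD o 0 0 < PySem.List.pyGetD d 0 0) &&
  decide (PySem.List.pyGetD o 1 0 < PySem.List.pyGetD d 1 0) &&
  decide (PySem.List.pyGetD o 2 0 < PySem.List.pyGetD d 2 0)

-- best ds i = (h, p) of B's memoized best(i): the for-j loop over range(i)
def best (ds : List (List Int)) (i : Nat) : Int × Int :=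
  (List.range i).attach.foldl
    (fun (c : Int × Int) j =>
      if validAbove (PySem.List.pyGetD ds (j.1 : Int) []) (PySem.List.pyGetD ds (i : Int) []) then
        if c.1 ≤ PySem.List.pyGetD (PySem.List.pyGetD ds (i : Int) []) 2 0 + (best ds j.1).1 then
          (PySem.List.pyGetD (PySem.List.pyGetD ds (i : Int) []) 2 0 + (best ds j.1).1, (j.1 : Int))
        else c
      else c)
    (PySem.List.pyGetD (PySem.List.pyGetD ds (i : Int) []) 2 0, -1)
termination_by i
decreasing_by have := j.2; simp only [List.mem_range] at this; omega

-- Python's max(range(n), key=...): first maximal index (update only on strictly greater)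
def topIndex (ds : List (List Int)) (n : Nat) : Nat :=
  (List.range' 1 (n - 1)).foldl (fun b i => if (best ds b).1 < (best ds i).1 then i else b) 0

-- B's while loop: stack.insert(0, disks[top]); top = best(top)[1]
def chainLoop (ds : List (List Int)) : Nat → Int → List (List Int) → List (List Int)
  | 0, _, stack => stack
  | fuel + 1, top, stack =>
    if top = -1 then stack
    else chainLoop ds fuel (best ds top.toNat).2 (PySem.List.pyGetD ds top [] :: stack)

def DiskStacking_alt (disks : List (List Int)) : List (List Int) :=
  let ds := PySem.List.sorted disks (fun x => PySem.List.pyGetD x 2 0)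
  chainLoop ds (ds.length + 1) ((topIndex ds ds.length : Nat) : Int) []

-- ===== PRECONDITION & SPEC =====
-- Pre_ excludes exactly the inputs on which the Python A raises: the empty list
-- (max() of an empty sequence, ValueError) and any disk with fewer than 3 entries
-- (IndexError in the sort key / height list).
def Pre_DiskStacking (disks : List (List Int)) : Prop :=
  disks ≠ [] ∧ ∀ d ∈ disks, 3 ≤ d.length
instance (disks : List (List Int)) : Decidable (Pre_DiskStacking disks) := by
  unfold Pre_DiskStacking; infer_instance

def pvWitness_DiskStacking : List (List Int) := [[2, 2, 3], [1, 1, 1]]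

def Spec_DiskStacking (disks : List (List Int)) (out : List (List Int)) : Prop := out = DiskStacking_alt disks
instance (disks : List (List Int)) (out : List (List Int)) : Decidable (Spec_DiskStacking disks out) := by unfold Spec_DiskStacking; infer_instance

-- ===== CLAIM (what is proved, stated in full; the proofs are below) =====
def Claim_equal_DiskStacking : Prop := ∀ (disks : List (List Int)), Dom_DiskStacking disks → Pre_DiskStacking disks → Spec_DiskStacking disks (DiskStacking disks)

-- ===== LEMMAS AND PROOFS =====

theorem foldl_attach_eq {a b : Type} (l : List a) (f : b → a → b) (init : b) :
    l.attach.foldl (fun c t => f c t.1) init = l.foldl f init := by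
  conv_rhs => rw [← List.attach_map_subtype_val l]
  rw [List.foldl_map]

-- unfold B's best to a plain fold over List.range i
theorem best_unfold (ds : List (List Int)) (i : Nat) :
    best ds i = (List.range i).foldl
      (fun (c : Int × Int) (j : Nat) =>
        if validAbove (PySem.List.pyGetD ds (j : Int) []) (PySem.List.pyGetD ds (i : Int) []) then
          if c.1 ≤ PySem.List.pyGetD (PySem.List.pyGetD ds (i : Int) []) 2 0 + (best ds j).1 then
            (PySem.List.pyGetD (PySem.List.pyGetD ds (i : Int) []) 2 0 + (best ds j).1, (j : Int))
          else c
        else c)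
      (PySem.List.pyGetD (PySem.List.pyGetD ds (i : Int) []) 2 0, -1) := by
  rw [best]
  exact foldl_attach_eq (List.range i)
    (fun (c : Int × Int) (j : Nat) =>
      if validAbove (PySem.List.pyGetD ds (j : Int) []) (PySem.List.pyGetD ds (i : Int) []) then
        if c.1 ≤ PySem.List.pyGetD (PySem.List.pyGetD ds (i : Int) []) 2 0 + (best ds j).1 then
          (PySem.List.pyGetD (PySem.List.pyGetD ds (i : Int) []) 2 0 + (best ds j).1, (j : Int))
        else c
      else c) _

theorem valid_eq : areValidDimensions = validAbove := rfl

theorem pyGetD_map_range (f : ℕ → ℤ) (n i : ℕ) (d : ℤ) (h : i < n) :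
    PySem.List.pyGetD ((List.range n).map f) (i : Int) d = f i := by
  rw [PySem.List.pyGetD_natCast]
  rw [List.getD_eq_getElem?_getD]
  simp [h]

theorem best_zero (ds : List (List Int)) :
    best ds 0 = (PySem.List.pyGetD (PySem.List.pyGetD ds (0 : Int) []) 2 0, -1) := by
  rw [best]
  simp

def finalH (ds : List (List Int)) (n i : ℕ) : List Int :=
  (List.range n).map (fun k => if k < i then (best ds k).1
    else PySem.List.pyGetD (PySem.List.pyGetD ds (k : Int) []) 2 0)

def finalS (ds : List (List Int)) (n i : ℕ) : List Int :=
  (List.range n).map (fun k => if k < i then (best ds k).2 else (-1 : ℤ))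

theorem set_map_range (f : ℕ → ℤ) (n i : ℕ) (v : ℤ) (_h : i < n) :
    ((List.range n).map f).set i v
      = (List.range n).map (fun k => if k = i then v else f k) := by
  apply List.ext_getElem
  · simp
  · intro j h1 h2
    rw [List.getElem_set]
    by_cases hji : i = j
    · subst hji
      simp
    · rw [if_neg hji]
      simp only [List.getElem_map, List.getElem_range]
      rw [if_neg (fun hh => hji hh.symm)]

theorem outer_inv (ds : List (List Int)) :
    ∀ m, m + 1 ≤ ds.length →
      (List.range' 1 m).foldl (fun (st : List Int × List Int) (i : Nat) =>
        (st.1.set i ((List.range i).foldl (fun (c : Int × Int) (j : Nat) =>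
            if areValidDimensions (PySem.List.pyGetD ds (j : Int) []) (PySem.List.pyGetD ds (i : Int) []) then
              (if c.1 ≤ PySem.List.pyGetD (PySem.List.pyGetD ds (i : Int) []) 2 0 + PySem.List.pyGetD st.1 (j : Int) 0 then
                (PySem.List.pyGetD (PySem.List.pyGetD ds (i : Int) []) 2 0 + PySem.List.pyGetD st.1 (j : Int) 0, (j : Int))
              else c)
            else c)
            (PySem.List.pyGetD st.1 (i : Int) 0, PySem.List.pyGetD st.2 (i : Int) (-1))).1,
         st.2.set i ((List.range i).foldl (fun (c : Int × Int) (j : Nat) =>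
            if areValidDimensions (PySem.List.pyGetD ds (j : Int) []) (PySem.List.pyGetD ds (i : Int) []) then
              (if c.1 ≤ PySem.List.pyGetD (PySem.List.pyGetD ds (i : Int) []) 2 0 + PySem.List.pyGetD st.1 (j : Int) 0 then
                (PySem.List.pyGetD (PySem.List.pyGetD ds (i : Int) []) 2 0 + PySem.List.pyGetD st.1 (j : Int) 0, (j : Int))
              else c)
            else c)
            (PySem.List.pyGetD st.1 (i : Int) 0, PySem.List.pyGetD st.2 (i : Int) (-1))).2))
        (ds.map (fun disk => PySem.List.pyGetD disk 2 0), ds.map (fun _ => (-1 : Int)))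
      = (finalH ds ds.length (m + 1), finalS ds ds.length (m + 1)) := by
  intro m
  induction m with
  | zero =>
    intro hm
    simp only [List.range'_zero, List.foldl_nil, finalH, finalS]
    refine Prod.ext ?_ ?_
    · apply List.ext_getElem
      · simp
      · intro j h1 h2
        simp only [List.length_map] at h1
        simp only [List.getElem_map, List.getElem_range]
        by_cases hj : j < 1
        · rw [if_pos hj]
          have : j = 0 := by omega
          subst this
          rw [best_zero]
          simp [PySem.List.pyGetD_zero, List.getD_eq_getElem?_getD, h1]
        · rw [if_neg hj]
          rw [PySem.List.pyGetD_natCast, List.getD_eq_getElem?_getD]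
          simp only [List.length_map, List.length_range] at h2
          simp [h2]
    · apply List.ext_getElem
      · simp
      · intro j h1 h2
        simp only [List.getElem_map, List.getElem_range]
        by_cases hj : j < 1
        · rw [if_pos hj]
          have : j = 0 := by omega
          subst this
          rw [best_zero]
        · rw [if_neg hj]
  | succ m ih =>
    intro hm
    rw [List.range'_concat, List.foldl_append, ih (by omega), List.foldl_cons, List.foldl_nil]
    have hidx : 1 + 1 * m = m + 1 := by ring
    rw [hidx]
    have hmn : m + 1 < ds.length := by omega
    have hH : PySem.List.pyGetD (finalH ds ds.length (m + 1)) ((m + 1 : ℕ) : ℤ) 0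
        = PySem.List.pyGetD (PySem.List.pyGetD ds ((m + 1 : ℕ) : ℤ) []) 2 0 := by
      unfold finalH
      rw [pyGetD_map_range _ _ _ _ hmn]
      simp
    have hS : PySem.List.pyGetD (finalS ds ds.length (m + 1)) ((m + 1 : ℕ) : ℤ) (-1) = -1 := by
      unfold finalS
      rw [pyGetD_map_range _ _ _ _ hmn]
      simp
    simp only [hH, hS]
    have hcongr : List.foldl (fun (c : ℤ × ℤ) (j : ℕ) =>
        if areValidDimensions (PySem.List.pyGetD ds (j : Int) []) (PySem.List.pyGetD ds ((m + 1 : ℕ) : Int) []) = true then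
          if c.1 ≤ PySem.List.pyGetD (PySem.List.pyGetD ds ((m + 1 : ℕ) : Int) []) 2 0 + PySem.List.pyGetD (finalH ds ds.length (m + 1)) (j : Int) 0 then
            (PySem.List.pyGetD (PySem.List.pyGetD ds ((m + 1 : ℕ) : Int) []) 2 0 + PySem.List.pyGetD (finalH ds ds.length (m + 1)) (j : Int) 0, (j : ℤ))
          else c
        else c)
        (PySem.List.pyGetD (PySem.List.pyGetD ds ((m + 1 : ℕ) : ℤ) []) 2 0, -1) (List.range (m + 1))
      = List.foldl (fun (c : ℤ × ℤ) (j : ℕ) =>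
        if validAbove (PySem.List.pyGetD ds (j : Int) []) (PySem.List.pyGetD ds ((m + 1 : ℕ) : Int) []) = true then
          if c.1 ≤ PySem.List.pyGetD (PySem.List.pyGetD ds ((m + 1 : ℕ) : Int) []) 2 0 + (best ds j).1 then
            (PySem.List.pyGetD (PySem.List.pyGetD ds ((m + 1 : ℕ) : Int) []) 2 0 + (best ds j).1, (j : ℤ))
          else c
        else c)
        (PySem.List.pyGetD (PySem.List.pyGetD ds ((m + 1 : ℕ) : ℤ) []) 2 0, -1) (List.range (m + 1)) := by
      apply PySem.List.foldl_congr_mem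
      intro acc j hj
      have hjm : j < m + 1 := List.mem_range.mp hj
      have hgf : PySem.List.pyGetD (finalH ds ds.length (m + 1)) (j : Int) 0 = (best ds j).1 := by
        unfold finalH
        rw [pyGetD_map_range _ _ _ _ (by omega)]
        rw [if_pos hjm]
      rw [hgf, valid_eq]
    rw [hcongr, ← best_unfold]
    refine Prod.ext ?_ ?_
    · show (finalH ds ds.length (m + 1)).set (m + 1) (best ds (m + 1)).1 = finalH ds ds.length (m + 1 + 1)
      unfold finalH
      rw [set_map_range _ _ _ _ hmn]
      apply List.map_congr_left
      intro k hk
      by_cases h1 : k = m + 1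
      · subst h1
        simp
      · rw [if_neg h1]
        by_cases h2 : k < m + 1
        · rw [if_pos h2, if_pos (by omega)]
        · rw [if_neg h2, if_neg (by omega)]
    · show (finalS ds ds.length (m + 1)).set (m + 1) (best ds (m + 1)).2 = finalS ds ds.length (m + 1 + 1)
      unfold finalS
      rw [set_map_range _ _ _ _ hmn]
      apply List.map_congr_left
      intro k hk
      by_cases h1 : k = m + 1
      · subst h1
        simp
      · rw [if_neg h1]
        by_cases h2 : k < m + 1
        · rw [if_pos h2, if_pos (by omega)]
        · rw [if_neg h2, if_neg (by omega)]

-- first-argmax properties of topIndex's fold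
theorem top_spec (ds : List (List Int)) :
    ∀ m, ((List.range' 1 m).foldl (fun b i => if (best ds b).1 < (best ds i).1 then i else b) 0) ≤ m ∧
      (∀ j, j ≤ m → (best ds j).1 ≤ (best ds ((List.range' 1 m).foldl (fun b i => if (best ds b).1 < (best ds i).1 then i else b) 0)).1) ∧
      (∀ j, j < ((List.range' 1 m).foldl (fun b i => if (best ds b).1 < (best ds i).1 then i else b) 0) →
        (best ds j).1 < (best ds ((List.range' 1 m).foldl (fun b i => if (best ds b).1 < (best ds i).1 then i else b) 0)).1) := by
  intro m
  induction m with
  | zero =>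
    refine ⟨by simp, ?_, ?_⟩
    · intro j hj
      have : j = 0 := by omega
      subst this
      simp
    · intro j hj
      simp at hj
  | succ m ih =>
    obtain ⟨h1, h2, h3⟩ := ih
    rw [List.range'_concat] at *
    simp only [List.foldl_append, List.foldl_cons, List.foldl_nil] at *
    have hidx : 1 + 1 * m = m + 1 := by ring
    rw [hidx] at *
    set t := (List.range' 1 m).foldl (fun b i => if (best ds b).1 < (best ds i).1 then i else b) 0 with ht
    by_cases hc : (best ds t).1 < (best ds (m + 1)).1
    · rw [if_pos hc]
      refine ⟨by omega, ?_, ?_⟩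
      · intro j hj
        rcases Nat.lt_or_ge j (m + 1) with h | h
        · exact le_of_lt (lt_of_le_of_lt (h2 j (by omega)) hc)
        · have : j = m + 1 := by omega
          subst this
          exact le_refl _
      · intro j hj
        exact lt_of_le_of_lt (h2 j (by omega)) hc
    · rw [if_neg hc]
      refine ⟨by omega, ?_, h3⟩
      intro j hj
      rcases Nat.lt_or_ge j (m + 1) with h | h
      · exact h2 j (by omega)
      · have : j = m + 1 := by omega
        subst this
        omega

theorem maxD_spec (l : List Int) (d : Int) (h : l ≠ []) :
    (PySem.List.max? l (fun v => v)).getD d ∈ l ∧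
    ∀ y ∈ l, y ≤ (PySem.List.max? l (fun v => v)).getD d := by
  cases hm : PySem.List.max? l (fun v => v) with
  | none => exact absurd ((PySem.List.max?_eq_none_iff l _).mp hm) h
  | some m =>
    refine ⟨?_, ?_⟩
    · simpa using PySem.List.max?_mem hm
    · intro y hy; simpa using PySem.List.max?_isMax hm y hy

theorem maxD_eq_of (l : List Int) (d a : Int) (ha : a ∈ l) (hmax : ∀ y ∈ l, y ≤ a) :
    (PySem.List.max? l (fun v => v)).getD d = a := by
  have hne : l ≠ [] := by intro h0; rw [h0] at ha; cases ha
  obtain ⟨hm, hb⟩ := maxD_spec l d hne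
  exact le_antisymm (hmax _ hm) (hb a ha)

theorem index_map_range_eq (F : ℕ → ℤ) (n t : ℕ) (ht : t < n)
    (hlt : ∀ j, j < t → F j ≠ F t) :
    PySem.List.index? ((List.range n).map F) (F t) = some t := by
  rw [PySem.List.index?_eq_some_iff]
  refine ⟨(List.range t).map F, ((List.range (n - t - 1)).map (fun x => t + 1 + x)).map F, ?_, by simp, ?_⟩
  · have hr : List.range n = List.range t ++ t :: (List.range (n - t - 1)).map (fun x => t + 1 + x) := by
      rw [show n = (t + 1) + (n - t - 1) from by omega, List.range_add, List.range_succ]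
      simp
      have he : t + 1 + (n - t - 1) - t - 1 = n - t - 1 := by omega
      rw [he]
    rw [hr]
    simp
  · intro hmem
    obtain ⟨j, hj, hje⟩ := List.mem_map.mp hmem
    exact hlt j (List.mem_range.mp hj) hje

theorem pred_bound (ds : List (List Int)) (k : ℕ) :
    (best ds k).2 = -1 ∨ (0 ≤ (best ds k).2 ∧ (best ds k).2 < (k : ℤ)) := by
  rw [best_unfold]
  have main : ∀ (l : List ℕ) (c : ℤ × ℤ), (∀ j ∈ l, j < k) →
      (c.2 = -1 ∨ (0 ≤ c.2 ∧ c.2 < (k : ℤ))) →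
      ((l.foldl (fun (c : Int × Int) (j : Nat) =>
        if validAbove (PySem.List.pyGetD ds (j : Int) []) (PySem.List.pyGetD ds (k : Int) []) then
          if c.1 ≤ PySem.List.pyGetD (PySem.List.pyGetD ds (k : Int) []) 2 0 + (best ds j).1 then
            (PySem.List.pyGetD (PySem.List.pyGetD ds (k : Int) []) 2 0 + (best ds j).1, (j : Int))
          else c
        else c) c).2 = -1 ∨
        (0 ≤ (l.foldl (fun (c : Int × Int) (j : Nat) =>
        if validAbove (PySem.List.pyGetD ds (j : Int) []) (PySem.List.pyGetD ds (k : Int) []) then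
          if c.1 ≤ PySem.List.pyGetD (PySem.List.pyGetD ds (k : Int) []) 2 0 + (best ds j).1 then
            (PySem.List.pyGetD (PySem.List.pyGetD ds (k : Int) []) 2 0 + (best ds j).1, (j : Int))
          else c
        else c) c).2 ∧ (l.foldl (fun (c : Int × Int) (j : Nat) =>
        if validAbove (PySem.List.pyGetD ds (j : Int) []) (PySem.List.pyGetD ds (k : Int) []) then
          if c.1 ≤ PySem.List.pyGetD (PySem.List.pyGetD ds (k : Int) []) 2 0 + (best ds j).1 then
            (PySem.List.pyGetD (PySem.List.pyGetD ds (k : Int) []) 2 0 + (best ds j).1, (j : Int))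
          else c
        else c) c).2 < (k : ℤ))) := by
    intro l
    induction l with
    | nil => intro c _ hc; exact hc
    | cons a t ih =>
      intro c hmem hc
      simp only [List.foldl_cons]
      apply ih _ (fun j hj => hmem j (List.mem_cons_of_mem _ hj))
      have hak : a < k := hmem a (List.mem_cons_self ..)
      split_ifs
      · right
        refine ⟨?_, ?_⟩
        · simp
        · simpa using (by exact_mod_cast hak : (a : ℤ) < (k : ℤ))
      · exact hc
      · exact hc
  exact main _ _ (fun j hj => List.mem_range.mp hj) (Or.inl rfl)

-- A's walk over sequences = best .2 equals B's front-first chainLoop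
theorem walk (ds : List (List Int)) :
    ∀ (fuel : ℕ) (idx : ℤ) (acc : List (List Int)), -1 ≤ idx → idx < (ds.length : ℤ) →
      (buildSequenceLoop ds ((List.range ds.length).map (fun k => (best ds k).2)) fuel idx acc).reverse
        = chainLoop ds fuel idx acc.reverse := by
  intro fuel
  induction fuel with
  | zero =>
    intro idx acc h1 h3
    simp [buildSequenceLoop, chainLoop]
  | succ fuel ih =>
    intro idx acc h1 h3
    by_cases hidx : idx = -1
    · subst hidx
      simp [buildSequenceLoop, chainLoop]
    · have h0 : 0 ≤ idx := by omega
      obtain ⟨k, rfl⟩ : ∃ k : ℕ, idx = (k : ℤ) := ⟨idx.toNat, (Int.toNat_of_nonneg h0).symm⟩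
      have hk : k < ds.length := by exact_mod_cast h3
      simp only [buildSequenceLoop, chainLoop, if_neg hidx]
      rw [pyGetD_map_range _ _ _ _ hk]
      have htn : ((k : ℤ)).toNat = k := Int.toNat_natCast k
      rw [htn]
      have hp : -1 ≤ (best ds k).2 ∧ (best ds k).2 < (ds.length : ℤ) := by
        rcases pred_bound ds k with a | ⟨a, b⟩
        · rw [a]
          exact ⟨le_refl _, by omega⟩
        · refine ⟨by omega, ?_⟩
          have : (k : ℤ) < (ds.length : ℤ) := by exact_mod_cast hk
          omega
      rw [ih _ _ hp.1 hp.2]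
      simp

theorem equal_main (disks : List (List Int)) (hne : disks ≠ []) :
    DiskStacking disks = DiskStacking_alt disks := by
  simp only [DiskStacking, DiskStacking_alt]
  have hlen : 1 ≤ (PySem.List.sorted disks (fun x => PySem.List.pyGetD x 2 0)).length := by
    rw [PySem.List.length_sorted]
    exact List.length_pos_of_ne_nil hne
  generalize hg : PySem.List.sorted disks (fun x => PySem.List.pyGetD x 2 0) = ds at *
  have hout := outer_inv ds (ds.length - 1) (by omega)
  rw [show ds.length - 1 + 1 = ds.length from by omega] at hout
  rw [hout]
  have hHf : finalH ds ds.length ds.length = (List.range ds.length).map (fun k => (best ds k).1) := by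
    unfold finalH
    apply List.map_congr_left
    intro k hk
    rw [if_pos (List.mem_range.mp hk)]
  have hSf : finalS ds ds.length ds.length = (List.range ds.length).map (fun k => (best ds k).2) := by
    unfold finalS
    apply List.map_congr_left
    intro k hk
    rw [if_pos (List.mem_range.mp hk)]
  obtain ⟨ht1, ht2, ht3⟩ := top_spec ds (ds.length - 1)
  rw [show (List.range' 1 (ds.length - 1)).foldl (fun b i => if (best ds b).1 < (best ds i).1 then i else b) 0 = topIndex ds ds.length from rfl] at ht1 ht2 ht3
  have htn : topIndex ds ds.length < ds.length := by omega
  have hmax : (PySem.List.max? ((List.range ds.length).map (fun k => (best ds k).1)) (fun h => h)).getD 0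
      = (best ds (topIndex ds ds.length)).1 := by
    apply maxD_eq_of
    · exact List.mem_map.mpr ⟨topIndex ds ds.length, List.mem_range.mpr htn, rfl⟩
    · intro y hy
      obtain ⟨j, hj, rfl⟩ := List.mem_map.mp hy
      exact ht2 j (by have := List.mem_range.mp hj; omega)
  have hidx : PySem.List.index? ((List.range ds.length).map (fun k => (best ds k).1))
      ((best ds (topIndex ds ds.length)).1) = some (topIndex ds ds.length) := by
    apply index_map_range_eq
    · exact htn
    · intro j hj
      exact ne_of_lt (ht3 j hj)
  simp only [hHf, hSf, hmax, hidx, Option.getD_some]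
  unfold buildSequence
  rw [walk ds (ds.length + 1) ((topIndex ds ds.length : ℕ) : ℤ) []
    (by omega) (by exact_mod_cast htn)]
  rfl

-- ===== VERDICT (by name: the statement is the Claim_ definition above) =====
theorem DiskStacking_spec : Claim_equal_DiskStacking := by
  intro disks hdom hpre
  unfold Spec_DiskStacking
  exact equal_main disks hpre.1
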